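-- pv_equiv track=rewrite | github.com/danielfvm/SeeingC | testAsiCV.py | calcProfile
-- ===== SOURCE A (Python) =====
-- def calcProfile(image, mainStar, size):
--     (starX, starY, _) = mainStar
--     FULLW = size * 2 + 1
--
--     horiz_profile = [0] * FULLW
--     vert_profile  = [0] * FULLW
--
--     for x in range(FULLW):
--         for y in range(FULLW):
--             brightness = image[starY - size + y][starX - size + x]
--             horiz_profile[x] += brightness
--             vert_profile[y] += brightness
--
--     return (horiz_profile, vert_profile)
-- ===== SOURCE B (Python) =====
-- def calcProfile(image, mainStar, size):
--     (starX, starY, _) = mainStar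
--     FULLW = size * 2 + 1
--
--     window = [[image[starY - size + y][starX - size + x] for x in range(FULLW)]
--               for y in range(FULLW)]
--
--     vert_profile = [sum(row) for row in window]
--     horiz_profile = [sum(row[x] for row in window) for x in range(FULLW)]
--
--     return (horiz_profile, vert_profile)
-- ===== Notes on version B (the rewrite author's own statement) =====
-- stated objective: simpler
-- what changed: Replaces the fused double loop that maintains both running-sum arrays in place with building the 2D window once and then taking row sums and column sums as two separate map/reduce passes.
import Mathlib
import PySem

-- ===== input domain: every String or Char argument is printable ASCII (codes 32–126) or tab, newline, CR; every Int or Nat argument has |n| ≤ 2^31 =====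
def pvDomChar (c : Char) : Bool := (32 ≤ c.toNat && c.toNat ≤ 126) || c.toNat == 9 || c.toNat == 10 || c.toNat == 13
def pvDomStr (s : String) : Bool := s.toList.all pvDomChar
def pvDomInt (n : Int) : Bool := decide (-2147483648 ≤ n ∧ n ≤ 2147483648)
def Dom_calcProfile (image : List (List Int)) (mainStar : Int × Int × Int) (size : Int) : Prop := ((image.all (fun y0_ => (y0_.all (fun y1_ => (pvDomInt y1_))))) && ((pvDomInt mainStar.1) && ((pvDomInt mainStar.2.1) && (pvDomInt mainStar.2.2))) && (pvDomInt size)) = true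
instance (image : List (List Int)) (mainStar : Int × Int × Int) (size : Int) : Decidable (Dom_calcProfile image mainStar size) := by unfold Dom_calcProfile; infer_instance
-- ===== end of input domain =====

-- B builds the 2D window once and takes row/column sums in two separate passes, instead of A's fused
-- double loop maintaining both running-sum arrays in place (objective: simpler decomposition).


-- ===== PORT A =====
def calcProfile (image : List (List Int)) (mainStar : Int × Int × Int) (size : Int) : List Int × List Int :=
  let starX := mainStar.1
  let starY := mainStar.2.1
  let FULLW := size * 2 + 1
  let horiz : List Int := List.replicate FULLW.toNat 0      -- [0] * FULLW
  let vert : List Int := List.replicate FULLW.toNat 0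
  (PySem.List.pyRange 0 FULLW 1).foldl (fun (hv : List Int × List Int) x =>
    (PySem.List.pyRange 0 FULLW 1).foldl (fun (hv : List Int × List Int) y =>
      let brightness :=
        PySem.List.pyGetD (PySem.List.pyGetD image (starY - size + y) []) (starX - size + x) 0
      (PySem.List.pySetD hv.1 x (PySem.List.pyGetD hv.1 x 0 + brightness),
       PySem.List.pySetD hv.2 y (PySem.List.pyGetD hv.2 y 0 + brightness))) hv)
    (horiz, vert)

-- ===== PORT B =====
def calcProfile_alt (image : List (List Int)) (mainStar : Int × Int × Int) (size : Int) : List Int × List Int :=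
  let starX := mainStar.1
  let starY := mainStar.2.1
  let FULLW := size * 2 + 1
  let window := (PySem.List.pyRange 0 FULLW 1).map (fun y =>
    (PySem.List.pyRange 0 FULLW 1).map (fun x =>
      PySem.List.pyGetD (PySem.List.pyGetD image (starY - size + y) []) (starX - size + x) 0))
  let vert_profile := window.map List.sum
  let horiz_profile := (PySem.List.pyRange 0 FULLW 1).map (fun x =>
    (window.map (fun row => PySem.List.pyGetD row x 0)).sum)
  (horiz_profile, vert_profile)

-- ===== PRECONDITION & SPEC =====
-- Pre_: every pixel access image[starY-size+y][starX-size+x] is in Python range (negative wrap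
-- allowed); otherwise Python raises IndexError.  Row 0 <= j < len(image) is touched iff its plain
-- or wrapped Int index lies in [starY-size, starY+size].
def Pre_calcProfile (image : List (List Int)) (mainStar : Int × Int × Int) (size : Int) : Prop :=
  size * 2 + 1 ≤ 0 ∨
    (-(image.length : Int) ≤ mainStar.2.1 - size ∧ mainStar.2.1 + size < (image.length : Int) ∧
     ∀ j ∈ List.range image.length,
       ((mainStar.2.1 - size ≤ (j : Int) ∧ (j : Int) ≤ mainStar.2.1 + size) ∨
        (mainStar.2.1 - size ≤ (j : Int) - image.length ∧
         (j : Int) - image.length ≤ mainStar.2.1 + size)) →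
       (-(((image.getD j []).length : Int)) ≤ mainStar.1 - size ∧
        mainStar.1 + size < ((image.getD j []).length : Int)))
instance (image : List (List Int)) (mainStar : Int × Int × Int) (size : Int) : Decidable (Pre_calcProfile image mainStar size) := by unfold Pre_calcProfile; infer_instance

def pvWitness_calcProfile : List (List Int) × (Int × Int × Int) × Int := ([[3]], (0, 0, 0), 0)

def Spec_calcProfile (image : List (List Int)) (mainStar : Int × Int × Int) (size : Int) (out : List Int × List Int) : Prop := out = calcProfile_alt image mainStar size
instance (image : List (List Int)) (mainStar : Int × Int × Int) (size : Int) (out : List Int × List Int) : Decidable (Spec_calcProfile image mainStar size out) := by unfold Spec_calcProfile; infer_instance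

-- ===== CLAIM (what is proved, stated in full; the proofs are below) =====
def Claim_equal_calcProfile : Prop := ∀ (image : List (List Int)) (mainStar : Int × Int × Int) (size : Int), Dom_calcProfile image mainStar size → Pre_calcProfile image mainStar size → Spec_calcProfile image mainStar size (calcProfile image mainStar size)

-- ===== LEMMAS AND PROOFS =====

-- take (j+1) of a list set at j
lemma pv_take_succ_set (l : List Int) (j : Nat) (w : Int) (h : j < l.length) :
    (l.set j w).take (j + 1) = l.take j ++ [w] := by
  induction l generalizing j with
  | nil => simp at h
  | cons a l ih =>
    cases j with
    | zero => simp
    | succ j => simp [ih j (by simpa using h)]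

-- repeated "h[x] += c y" at a FIXED index x collapses to one update by the sum
lemma pv_hinner (c : Int → Int) (x : Int) (hx : 0 ≤ x) :
    ∀ (ys : List Int) (h0 : List Int), x.toNat < h0.length →
      ys.foldl (fun h y => PySem.List.pySetD h x (PySem.List.pyGetD h x 0 + c y)) h0
        = PySem.List.pySetD h0 x (PySem.List.pyGetD h0 x 0 + (ys.map c).sum) := by
  intro ys
  induction ys with
  | nil =>
    intro h0 hlen
    simp [PySem.List.pySetD_of_nonneg _ _ hx,
      PySem.List.pyGetD_eq_getElem h0 0 hx (by exact_mod_cast Int.lt_of_toNat_lt (by omega)),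
      List.set_getElem_self]
  | cons y ys ih =>
    intro h0 hlen
    have hxlt : x < (h0.length : Int) := by
      have := Int.toNat_of_nonneg hx; omega
    simp only [List.foldl_cons]
    rw [ih _ (by rw [PySem.List.length_pySetD]; exact hlen)]
    have e1 : PySem.List.pyGetD (PySem.List.pySetD h0 x (PySem.List.pyGetD h0 x 0 + c y)) x 0
        = PySem.List.pyGetD h0 x 0 + c y := by
      rw [PySem.List.pySetD_of_nonneg _ _ hx,
          PySem.List.pyGetD_eq_getElem _ 0 hx (by simpa using hxlt)]
      simp
    have e2 : ∀ w : Int, PySem.List.pySetD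
          (PySem.List.pySetD h0 x (PySem.List.pyGetD h0 x 0 + c y)) x w
        = PySem.List.pySetD h0 x w := by
      intro w
      rw [PySem.List.pySetD_of_nonneg _ _ hx, PySem.List.pySetD_of_nonneg _ _ hx,
          PySem.List.pySetD_of_nonneg _ _ hx, List.set_set]
    rw [e1, e2]
    simp [add_assoc]

-- a sweep "for y in range(a, len(v)): v[y] = v[y] + c y" rewrites the tail past a
lemma pv_setloop (c : Int → Int) :
    ∀ (m : Nat) (a : Int) (v0 : List Int), 0 ≤ a → m = v0.length - a.toNat →
      (PySem.List.pyRange a (v0.length : Int) 1).foldl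
          (fun v y => PySem.List.pySetD v y (PySem.List.pyGetD v y 0 + c y)) v0
        = v0.take a.toNat
            ++ (PySem.List.pyRange a (v0.length : Int) 1).map
                (fun y => PySem.List.pyGetD v0 y 0 + c y) := by
  intro m
  induction m with
  | zero =>
    intro a v0 ha hm
    have hle : (v0.length : Int) ≤ a := by omega
    rw [PySem.List.pyRange_one_eq_nil hle]
    have h2 : v0.length ≤ a.toNat := by omega
    simp [List.take_of_length_le h2]
  | succ m ih =>
    intro a v0 ha hm
    have hlt : a < (v0.length : Int) := by omega
    rw [PySem.List.pyRange_one_cons hlt]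
    simp only [List.foldl_cons, List.map_cons]
    set j := a.toNat with hj
    have hjlt : j < v0.length := by omega
    set w := PySem.List.pyGetD v0 a 0 + c a with hw
    have hv1 : PySem.List.pySetD v0 a w = v0.set j w := PySem.List.pySetD_of_nonneg _ _ ha
    have hlen1 : (v0.set j w).length = v0.length := by simp
    have ha1 : (0:Int) ≤ a + 1 := by omega
    have htn : (a + 1).toNat = j + 1 := by omega
    have hstep := ih (a + 1) (v0.set j w) ha1 (by rw [hlen1, htn]; omega)
    rw [hlen1] at hstep
    rw [hv1, hstep, htn, pv_take_succ_set v0 j w hjlt]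
    have hmap : (PySem.List.pyRange (a + 1) (v0.length : Int) 1).map
          (fun y => PySem.List.pyGetD (v0.set j w) y 0 + c y)
        = (PySem.List.pyRange (a + 1) (v0.length : Int) 1).map
          (fun y => PySem.List.pyGetD v0 y 0 + c y) := by
      apply List.map_congr_left
      intro y hy
      rw [PySem.List.mem_pyRange_one] at hy
      have h0y : 0 ≤ y := by omega
      have hylt : y < (v0.length : Int) := hy.2
      rw [PySem.List.pyGetD_eq_getElem _ 0 h0y (by simpa using hylt),
          PySem.List.pyGetD_eq_getElem v0 0 h0y hylt]
      rw [List.getElem_set_ne (by omega)]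
    rw [hmap, List.append_assoc]
    rfl

-- outer accumulation of the vertical profile: each pass adds one column pointwise
lemma pv_vloop (g : Int → Int → Int) (n : Nat) :
    ∀ (xs : List Int) (v0 : List Int), v0.length = n →
      xs.foldl (fun v x =>
          (PySem.List.pyRange 0 (n : Int) 1).foldl
            (fun v y => PySem.List.pySetD v y (PySem.List.pyGetD v y 0 + g y x)) v) v0
        = (PySem.List.pyRange 0 (n : Int) 1).map
            (fun y => PySem.List.pyGetD v0 y 0 + (xs.map (fun x => g y x)).sum) := by
  intro xs
  induction xs with
  | nil =>
    intro v0 hlen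
    simp only [List.foldl_nil, List.map_nil, List.sum_nil, add_zero]
    rw [← hlen]
    exact (PySem.List.map_pyGetD_pyRange_zero' v0 0).symm
  | cons x xs ih =>
    intro v0 hlen
    simp only [List.foldl_cons]
    have hb : (n : Int) = (v0.length : Int) := by exact_mod_cast hlen.symm
    rw [hb, pv_setloop _ v0.length 0 v0 le_rfl (by simp)]
    simp only [Int.toNat_zero, List.take_zero, List.nil_append]
    rw [← hb]
    rw [ih _ (by simp)]
    apply List.map_congr_left
    intro y hy
    rw [PySem.List.mem_pyRange_one] at hy
    rw [PySem.List.pyGetD_map_pyRange_of_nonneg _ _ _ _ hy.1 hy.2]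
    simp [add_assoc]

-- outer loop for the horizontal profile: replace each inner pass by its one-update form
lemma pv_hloop (g : Int → Int → Int) (n : Nat) :
    ∀ (xs : List Int) (h0 : List Int), h0.length = n → (∀ x ∈ xs, 0 ≤ x ∧ x < (n : Int)) →
      xs.foldl (fun h x =>
          (PySem.List.pyRange 0 (n : Int) 1).foldl
            (fun h y => PySem.List.pySetD h x (PySem.List.pyGetD h x 0 + g y x)) h) h0
        = xs.foldl (fun h x =>
            PySem.List.pySetD h x (PySem.List.pyGetD h x 0
              + ((PySem.List.pyRange 0 (n : Int) 1).map (fun y => g y x)).sum)) h0 := by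
  intro xs
  induction xs with
  | nil => intro h0 _ _; rfl
  | cons x xs ih =>
    intro h0 hlen hmem
    obtain ⟨hx0, hxn⟩ := hmem x List.mem_cons_self
    simp only [List.foldl_cons]
    rw [pv_hinner _ x hx0 _ h0 (by omega)]
    exact ih _ (by simp [PySem.List.length_pySetD, hlen])
      (fun z hz => hmem z (List.mem_cons_of_mem _ hz))

-- split the fused pair-state double loop of A into its two independent components
lemma pv_split (G : Int → Int → Int) (W : Int) (h0 v0 : List Int) :
    (PySem.List.pyRange 0 W 1).foldl (fun (hv : List Int × List Int) x =>
        (PySem.List.pyRange 0 W 1).foldl (fun (hv : List Int × List Int) y =>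
          (PySem.List.pySetD hv.1 x (PySem.List.pyGetD hv.1 x 0 + G y x),
           PySem.List.pySetD hv.2 y (PySem.List.pyGetD hv.2 y 0 + G y x))) hv) (h0, v0)
      = ((PySem.List.pyRange 0 W 1).foldl (fun h x =>
            (PySem.List.pyRange 0 W 1).foldl
              (fun h y => PySem.List.pySetD h x (PySem.List.pyGetD h x 0 + G y x)) h) h0,
         (PySem.List.pyRange 0 W 1).foldl (fun v x =>
            (PySem.List.pyRange 0 W 1).foldl
              (fun v y => PySem.List.pySetD v y (PySem.List.pyGetD v y 0 + G y x)) v) v0) := by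
  have hstep : (fun (hv : List Int × List Int) x =>
      (PySem.List.pyRange 0 W 1).foldl (fun (hv : List Int × List Int) y =>
        (PySem.List.pySetD hv.1 x (PySem.List.pyGetD hv.1 x 0 + G y x),
         PySem.List.pySetD hv.2 y (PySem.List.pyGetD hv.2 y 0 + G y x))) hv)
      = (fun (hv : List Int × List Int) x =>
        ((PySem.List.pyRange 0 W 1).foldl
            (fun h y => PySem.List.pySetD h x (PySem.List.pyGetD h x 0 + G y x)) hv.1,
         (PySem.List.pyRange 0 W 1).foldl
            (fun v y => PySem.List.pySetD v y (PySem.List.pyGetD v y 0 + G y x)) hv.2)) := by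
    funext hv x
    rw [← Prod.mk.eta (p := hv)]
    exact PySem.List.foldl_prod_mk
      (fun h y => PySem.List.pySetD h x (PySem.List.pyGetD h x 0 + G y x))
      (fun v y => PySem.List.pySetD v y (PySem.List.pyGetD v y 0 + G y x))
      (PySem.List.pyRange 0 W 1) hv.1 hv.2
  rw [hstep]
  exact PySem.List.foldl_prod_mk
    (fun h x => (PySem.List.pyRange 0 W 1).foldl
        (fun h y => PySem.List.pySetD h x (PySem.List.pyGetD h x 0 + G y x)) h)
    (fun v x => (PySem.List.pyRange 0 W 1).foldl
        (fun v y => PySem.List.pySetD v y (PySem.List.pyGetD v y 0 + G y x)) v)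
    (PySem.List.pyRange 0 W 1) h0 v0

-- B in canonical form: (column sums, row sums)
lemma pv_alt_eq (image : List (List Int)) (mainStar : Int × Int × Int) (size : Int) :
    calcProfile_alt image mainStar size
      = ((PySem.List.pyRange 0 (size * 2 + 1) 1).map (fun x =>
            ((PySem.List.pyRange 0 (size * 2 + 1) 1).map (fun y =>
              PySem.List.pyGetD (PySem.List.pyGetD image (mainStar.2.1 - size + y) [])
                (mainStar.1 - size + x) 0)).sum),
         (PySem.List.pyRange 0 (size * 2 + 1) 1).map (fun y =>
            ((PySem.List.pyRange 0 (size * 2 + 1) 1).map (fun x =>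
              PySem.List.pyGetD (PySem.List.pyGetD image (mainStar.2.1 - size + y) [])
                (mainStar.1 - size + x) 0)).sum)) := by
  simp only [calcProfile_alt, List.map_map]
  refine Prod.ext ?_ rfl
  apply List.map_congr_left
  intro x hx
  rw [PySem.List.mem_pyRange_one] at hx
  congr 1
  apply List.map_congr_left
  intro y _
  simp only [Function.comp]
  exact PySem.List.pyGetD_map_pyRange_of_nonneg _ _ _ _ hx.1 hx.2

-- ===== VERDICT (by name: the statement is the Claim_ definition above) =====
theorem calcProfile_spec : Claim_equal_calcProfile := by
  intro image mainStar size _ _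
  unfold Spec_calcProfile
  rw [pv_alt_eq]
  simp only [calcProfile]
  rcases (by omega : size * 2 + 1 ≤ 0 ∨ 0 < size * 2 + 1) with hW | hW
  · rw [PySem.List.pyRange_one_eq_nil hW]
    simp [Int.toNat_of_nonpos hW]
  · set W := size * 2 + 1 with hWdef
    set G : Int → Int → Int := fun y x =>
      PySem.List.pyGetD (PySem.List.pyGetD image (mainStar.2.1 - size + y) [])
        (mainStar.1 - size + x) 0 with hG
    set n := W.toNat with hn
    have hWn : (n : Int) = W := Int.toNat_of_nonneg (by omega)
    rw [pv_split G W (List.replicate n 0) (List.replicate n 0)]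
    rw [← hWn]
    have hget0 : ∀ z : Int, 0 ≤ z → z < (n : Int) →
        PySem.List.pyGetD (List.replicate n (0:Int)) z 0 = 0 := by
      intro z hz0 hzn
      rw [PySem.List.pyGetD_eq_getElem _ 0 hz0 (by simpa using hzn)]
      simp
    congr 1
    · -- horizontal component
      rw [pv_hloop G n _ _ (by simp)
        (fun x hx => by rw [PySem.List.mem_pyRange_one] at hx; exact hx)]
      have hb : (n : Int) = ((List.replicate n (0:Int)).length : Int) := by simp
      rw [hb, pv_setloop _ (List.replicate n (0:Int)).length 0 _ le_rfl (by simp)]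
      simp only [Int.toNat_zero, List.take_zero, List.nil_append]
      rw [← hb]
      apply List.map_congr_left
      intro x hx
      rw [PySem.List.mem_pyRange_one] at hx
      rw [hget0 x hx.1 hx.2, zero_add]
    · -- vertical component
      rw [pv_vloop G n _ _ (by simp)]
      apply List.map_congr_left
      intro y hy
      rw [PySem.List.mem_pyRange_one] at hy
      rw [hget0 y hy.1 hy.2, zero_add]
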